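-- pv_equiv track=rewrite | github.com/Santicar575/Trabajo-Practico-1-Simulacion-Bosque | Tp1_1_Cardelli.py | cantidades_matriz
-- ===== SOURCE A (Python) =====
-- def cantidades_matriz(matriz, tamaño_bosque):
--     arboles_quemados = 0
--     arboles_sanos = 0
--     arboles_quemandose = 0
--     for i in range(tamaño_bosque):
--         for j in range(tamaño_bosque):
--             if matriz[i][j] > 0:
--                 arboles_quemandose += 1
--             elif matriz[i][j] == 0:
--                 arboles_quemados += 1
--             elif matriz[i][j] == -1:
--                 arboles_sanos += 1
--     return {"arboles_quemados":arboles_quemados, "arboles_sanos":arboles_sanos, "arboles_quemandose":arboles_quemandose}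
-- ===== SOURCE B (Python) =====
-- def cantidades_matriz(matriz, tamaño_bosque):
--     # Build one value histogram of the tamaño_bosque x tamaño_bosque region,
--     # then read the three answers off the histogram.
--     cnt = {}
--     for i in range(tamaño_bosque):
--         for j in range(tamaño_bosque):
--             v = matriz[i][j]
--             cnt[v] = cnt.get(v, 0) + 1
--     return {"arboles_quemados": cnt.get(0, 0),
--             "arboles_sanos": cnt.get(-1, 0),
--             "arboles_quemandose": sum(c for k, c in cnt.items() if k > 0)}
-- ===== Notes on version B (the rewrite author's own statement) =====
-- stated objective: alternative
-- what changed: B replaces A's three running counters updated by an if/elif chain with a value histogram (dict) built over the region, reading the three answers off the histogram afterwards (lookups for 0 and -1, a sum over the keys > 0).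
import Mathlib
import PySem

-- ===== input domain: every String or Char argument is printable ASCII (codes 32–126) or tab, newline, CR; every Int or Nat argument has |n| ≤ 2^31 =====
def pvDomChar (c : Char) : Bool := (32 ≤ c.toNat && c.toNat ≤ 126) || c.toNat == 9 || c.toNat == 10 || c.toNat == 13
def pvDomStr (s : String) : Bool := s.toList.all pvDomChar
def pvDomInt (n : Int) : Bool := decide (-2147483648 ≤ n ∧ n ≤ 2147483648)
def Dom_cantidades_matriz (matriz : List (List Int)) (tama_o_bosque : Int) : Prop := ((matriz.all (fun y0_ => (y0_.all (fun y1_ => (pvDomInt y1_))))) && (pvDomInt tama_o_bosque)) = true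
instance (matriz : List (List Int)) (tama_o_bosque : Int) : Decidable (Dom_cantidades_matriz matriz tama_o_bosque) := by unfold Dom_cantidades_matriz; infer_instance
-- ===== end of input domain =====

-- B builds a value histogram (dict) of the region and reads the three counts off it, instead of A's three running counters; same cost.


-- ===== PORT A =====
-- the body of A's inner loop: state = (arboles_quemados, arboles_sanos, arboles_quemandose)
def pvStepA (st : Int × Int × Int) (v : Int) : Int × Int × Int :=
  if v > 0 then (st.1, st.2.1, st.2.2 + 1)
  else if v = 0 then (st.1 + 1, st.2.1, st.2.2)
  else if v = -1 then (st.1, st.2.1 + 1, st.2.2)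
  else st

def cantidades_matriz (matriz : List (List Int)) (tama_o_bosque : Int) : List (String × Int) :=
  let st :=
    (PySem.List.pyRange 0 tama_o_bosque 1).foldl (fun st i =>
      (PySem.List.pyRange 0 tama_o_bosque 1).foldl (fun st j =>
        pvStepA st (PySem.List.pyGetD (PySem.List.pyGetD matriz i []) j 0)) st)
      (0, 0, 0)
  [("arboles_quemados", st.1), ("arboles_sanos", st.2.1), ("arboles_quemandose", st.2.2)]

-- ===== PORT B =====
-- the body of B's inner loop: cnt[v] = cnt.get(v, 0) + 1
def pvStepB (d : PySem.Dict Int Int) (v : Int) : PySem.Dict Int Int :=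
  d.insert v (d.getD v 0 + 1)

def cantidades_matriz_alt (matriz : List (List Int)) (tama_o_bosque : Int) : List (String × Int) :=
  let cnt :=
    (PySem.List.pyRange 0 tama_o_bosque 1).foldl (fun cnt i =>
      (PySem.List.pyRange 0 tama_o_bosque 1).foldl (fun cnt j =>
        pvStepB cnt (PySem.List.pyGetD (PySem.List.pyGetD matriz i []) j 0)) cnt)
      PySem.Dict.empty
  [("arboles_quemados", cnt.getD 0 0),
   ("arboles_sanos", cnt.getD (-1) 0),
   ("arboles_quemandose",
     (cnt.items.filter (fun p => p.1 > 0)).foldl (fun a p => a + p.2) 0)]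

-- ===== PRECONDITION & SPEC =====
-- Pre_ excludes exactly the inputs where A (and B) raise IndexError: a positive
-- tamaño_bosque exceeding the number of rows, or exceeding the length of one of
-- the first tamaño_bosque rows.
def Pre_cantidades_matriz (matriz : List (List Int)) (tama_o_bosque : Int) : Prop :=
  0 < tama_o_bosque →
    tama_o_bosque ≤ (matriz.length : Int) ∧
      ∀ fila ∈ matriz.take tama_o_bosque.toNat, tama_o_bosque ≤ (fila.length : Int)
instance (matriz : List (List Int)) (tama_o_bosque : Int) : Decidable (Pre_cantidades_matriz matriz tama_o_bosque) := by unfold Pre_cantidades_matriz; infer_instance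

def pvWitness_cantidades_matriz : List (List Int) × Int := ([[1, 0], [-1, -2]], 2)

def Spec_cantidades_matriz (matriz : List (List Int)) (tama_o_bosque : Int) (out : List (String × Int)) : Prop := out = cantidades_matriz_alt matriz tama_o_bosque
instance (matriz : List (List Int)) (tama_o_bosque : Int) (out : List (String × Int)) : Decidable (Spec_cantidades_matriz matriz tama_o_bosque out) := by unfold Spec_cantidades_matriz; infer_instance

-- ===== CLAIM (what is proved, stated in full; the proofs are below) =====
def Claim_equal_cantidades_matriz : Prop := ∀ (matriz : List (List Int)) (tama_o_bosque : Int), Dom_cantidades_matriz matriz tama_o_bosque → Pre_cantidades_matriz matriz tama_o_bosque → Spec_cantidades_matriz matriz tama_o_bosque (cantidades_matriz matriz tama_o_bosque)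

-- ===== LEMMAS AND PROOFS =====

-- A's step folded over any value list adds the three counts.
lemma stepA_foldl (l : List Int) (q s b : Int) :
    l.foldl pvStepA (q, s, b) =
      (q + l.count 0, s + l.count (-1), b + (l.countP (fun v => decide (v > 0)) : Int)) := by
  induction l generalizing q s b with
  | nil => simp
  | cons v vs ih =>
    simp only [List.foldl_cons, pvStepA]
    split_ifs with h1 h0 hm
    · have hv0 : v ≠ 0 := by omega
      have hv1 : v ≠ -1 := by omega
      rw [ih]
      simp only [Prod.ext_iff, List.count_cons, List.countP_cons]
      refine ⟨?_, ?_, ?_⟩ <;> (simp [h1, hv0, hv1]; try omega)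
    · subst h0
      rw [ih]
      simp only [Prod.ext_iff, List.count_cons, List.countP_cons]
      refine ⟨?_, ?_, ?_⟩ <;> (simp; try omega)
    · subst hm
      rw [ih]
      simp only [Prod.ext_iff, List.count_cons, List.countP_cons]
      refine ⟨?_, ?_, ?_⟩ <;> (simp; try omega)
    · rw [ih]
      simp only [Prod.ext_iff, List.count_cons, List.countP_cons]
      refine ⟨?_, ?_, ?_⟩ <;> simp [h1, h0, hm]

-- B's step is the Counter step, so B's loop builds PySem.Dict.counter of the values.
lemma stepB_eq_modify (d : PySem.Dict Int Int) (v : Int) :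
    pvStepB d v = d.modify v 0 (· + 1) := by
  obtain ⟨items⟩ := d
  apply PySem.Dict.ext
  induction items with
  | nil => simp [pvStepB, PySem.Dict.insert, PySem.Dict.modify, PySem.Dict.getD, PySem.Dict.get?]
  | cons p ps ih => simp [pvStepB, PySem.Dict.insert, PySem.Dict.modify, PySem.Dict.getD, PySem.Dict.get?]

lemma stepB_foldl (l : List Int) :
    l.foldl pvStepB PySem.Dict.empty = PySem.Dict.counter l := by
  have h : (fun (d : PySem.Dict Int Int) (v : Int) => pvStepB d v)
      = fun d v => d.modify v 0 (· + 1) := funext₂ stepB_eq_modify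
  calc l.foldl pvStepB PySem.Dict.empty
      = l.foldl (fun d v => d.modify v 0 (· + 1)) PySem.Dict.empty := by rw [← h]
    _ = PySem.Dict.counter l := (PySem.Dict.counter_eq_foldl l).symm

-- fold over flatMap = nested fold
lemma foldl_flatMap' {α β γ : Type} (l : List α) (g : α → List β) (f : γ → β → γ) (init : γ) :
    (l.flatMap g).foldl f init = l.foldl (fun st x => (g x).foldl f st) init := by
  induction l generalizing init with
  | nil => rfl
  | cons x xs ih => simp [List.flatMap_cons, List.foldl_append, ih]

-- sum of p.2 over pairs via foldl
lemma foldl_add_snd (l : List (Int × Int)) (a : Int) :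
    l.foldl (fun a p => a + p.2) a = a + (l.map (·.2)).sum := by
  induction l generalizing a with
  | nil => simp
  | cons x xs ih => simp [ih]; ring

-- summing the multiplicities of the distinct positive values = countP positive
lemma sum_count_filter_pos (K vals : List Int) (hK : K.Nodup)
    (hmem : ∀ x ∈ vals, 0 < x → x ∈ K) :
    ((K.filter (fun k => decide (k > 0))).map (fun k => (vals.count k : Int))).sum
      = (vals.countP (fun v => decide (v > 0)) : Int) := by
  induction vals with
  | nil => simp
  | cons v vs ih =>
    have ih' := ih (fun x hx hp => hmem x (List.mem_cons_of_mem _ hx) hp)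
    have hrhs : (((v :: vs).countP (fun v => decide (v > 0)) : Nat) : Int)
        = ((vs.countP (fun v => decide (v > 0)) : Nat) : Int) + (if (0:Int) < v then 1 else 0) := by
      rw [List.countP_cons]
      by_cases hp : (0:Int) < v <;> simp [hp, GT.gt]
    by_cases hp : (0 : Int) < v
    · have hvK : v ∈ K.filter (fun k => decide (k > 0)) := by
        simp only [List.mem_filter]
        exact ⟨hmem v List.mem_cons_self hp, by simpa using hp⟩
      have hnd : (K.filter (fun k => decide (k > 0))).Nodup := hK.filter _
      obtain ⟨l1, l2, heq⟩ := List.append_of_mem hvK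
      rw [heq] at hnd
      have hv1 : v ∉ l1 := fun h =>
        (List.nodup_append.mp hnd).2.2 v h v List.mem_cons_self rfl
      have hv2 : v ∉ l2 := (List.nodup_cons.mp (List.nodup_append.mp hnd).2.1).1
      have key : ∀ (L : List Int), v ∉ L →
          (L.map (fun k => ((v :: vs).count k : Int))).sum
            = (L.map (fun k => (vs.count k : Int))).sum := by
        intro L hvL
        induction L with
        | nil => simp
        | cons y ys ihy =>
          simp only [List.map_cons, List.sum_cons]
          have hy : y ≠ v := fun h => hvL (h ▸ List.mem_cons_self)
          rw [ihy (fun h => hvL (List.mem_cons_of_mem _ h)), List.count_cons]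
          simp
          omega
      rw [heq, List.map_append, List.sum_append, List.map_cons, List.sum_cons,
          key l1 hv1, key l2 hv2, hrhs]
      rw [heq, List.map_append, List.sum_append, List.map_cons, List.sum_cons] at ih'
      have hc : ((v :: vs).count v : Int) = (vs.count v : Int) + 1 := by
        rw [List.count_cons]; simp
      rw [hc]
      simp only [hp, if_true]
      omega
    · have key : ((K.filter (fun k => decide (k > 0))).map (fun k => ((v :: vs).count k : Int))).sum
          = ((K.filter (fun k => decide (k > 0))).map (fun k => (vs.count k : Int))).sum := by
        apply congrArg
        apply List.map_congr_left
        intro k hk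
        have hkpos : (0:Int) < k := by
          have := (List.mem_filter.mp hk).2
          simpa using this
        rw [List.count_cons]
        simp
        omega
      rw [key, ih', hrhs]
      simp [hp]

-- the nested index loops over the region equal a fold over the region's values, for ANY step
lemma nested_loop_eq {β : Type} (f : β → Int → β) (matriz : List (List Int)) (t : Int)
    (ht0 : 0 ≤ t) (htlen : t ≤ (matriz.length : Int))
    (hrows : ∀ fila ∈ matriz.take t.toNat, t ≤ (fila.length : Int)) (init : β) :
    (PySem.List.pyRange 0 t 1).foldl (fun st i =>
      (PySem.List.pyRange 0 t 1).foldl (fun st j =>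
        f st (PySem.List.pyGetD (PySem.List.pyGetD matriz i []) j 0)) st) init
      = ((matriz.take t.toNat).flatMap (fun fila => fila.take t.toNat)).foldl f init := by
  have hmlen : (matriz.take t.toNat).length = t.toNat := by simp; omega
  have hinner : ∀ (fila : List Int), t ≤ (fila.length : Int) → ∀ (st : β),
      (PySem.List.pyRange 0 t 1).foldl (fun st j => f st (PySem.List.pyGetD fila j 0)) st
        = (fila.take t.toNat).foldl f st := by
    intro fila hlen st
    have hlen' : (fila.take t.toNat).length = t.toNat := by simp; omega
    have h1 : (PySem.List.pyRange 0 t 1).foldl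
        (fun st j => f st (PySem.List.pyGetD fila j 0)) st
        = (PySem.List.pyRange 0 t 1).foldl
        (fun st j => f st (PySem.List.pyGetD (fila.take t.toNat) j 0)) st := by
      apply PySem.List.foldl_congr_mem
      intro acc j hj
      rw [PySem.List.mem_pyRange_one] at hj
      obtain ⟨hj0, hjt⟩ := hj
      rw [PySem.List.pyGetD_eq_getElem fila 0 hj0 (by omega),
          PySem.List.pyGetD_eq_getElem (fila.take t.toNat) 0 hj0 (by omega)]
      congr 1
      rw [List.getElem_take]
    rw [h1]
    have hr : PySem.List.pyRange 0 t 1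
        = PySem.List.pyRange 0 ((fila.take t.toNat).length : Int) 1 := by
      rw [hlen', Int.toNat_of_nonneg ht0]
    rw [hr]
    exact PySem.List.foldl_pyRange_zero_pyGetD' (fila.take t.toNat) 0 f st
  have h1 : (PySem.List.pyRange 0 t 1).foldl (fun st i =>
      (PySem.List.pyRange 0 t 1).foldl (fun st j =>
        f st (PySem.List.pyGetD (PySem.List.pyGetD matriz i []) j 0)) st) init
      = (PySem.List.pyRange 0 t 1).foldl (fun st i =>
        ((PySem.List.pyGetD (matriz.take t.toNat) i []).take t.toNat).foldl f st) init := by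
    apply PySem.List.foldl_congr_mem
    intro acc i hi
    rw [PySem.List.mem_pyRange_one] at hi
    obtain ⟨hi0, hit⟩ := hi
    have hget : PySem.List.pyGetD matriz i [] = PySem.List.pyGetD (matriz.take t.toNat) i [] := by
      rw [PySem.List.pyGetD_eq_getElem matriz [] hi0 (by omega),
          PySem.List.pyGetD_eq_getElem (matriz.take t.toNat) [] hi0 (by omega)]
      exact (List.getElem_take).symm
    rw [hget]
    set fila := PySem.List.pyGetD (matriz.take t.toNat) i [] with hfila
    have hmem : fila ∈ matriz.take t.toNat := by
      rw [hfila]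
      exact PySem.List.pyGetD_mem _ _ ⟨by omega, by omega⟩
    exact hinner fila (hrows fila hmem) acc
  rw [h1, foldl_flatMap']
  have hr : PySem.List.pyRange 0 t 1
      = PySem.List.pyRange 0 ((matriz.take t.toNat).length : Int) 1 := by
    rw [hmlen, Int.toNat_of_nonneg ht0]
  rw [hr]
  exact PySem.List.foldl_pyRange_zero_pyGetD' (matriz.take t.toNat) []
    (fun st fila => (fila.take t.toNat).foldl f st) init

-- ===== VERDICT (by name: the statement is the Claim_ definition above) =====
theorem cantidades_matriz_spec : Claim_equal_cantidades_matriz := by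
  intro matriz t _hdom hpre
  unfold Spec_cantidades_matriz cantidades_matriz cantidades_matriz_alt
  by_cases hpos : 0 < t
  case neg =>
    -- empty region: both loops never run
    rw [PySem.List.pyRange_one_eq_nil (by omega)]
    simp [PySem.Dict.getD, PySem.Dict.get?, PySem.Dict.empty]
  case pos =>
    obtain ⟨htlen, hrows⟩ := hpre hpos
    have ht0 : 0 ≤ t := by omega
    set vals : List Int := (matriz.take t.toNat).flatMap (fun fila => fila.take t.toNat) with hvals
    rw [nested_loop_eq pvStepA matriz t ht0 htlen hrows (0,0,0),
        nested_loop_eq pvStepB matriz t ht0 htlen hrows PySem.Dict.empty]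
    rw [← hvals, stepA_foldl, stepB_foldl]
    simp only [PySem.Dict.getD_counter, PySem.Dict.items_counter, List.filter_map,
      foldl_add_snd, List.map_map, zero_add, Function.comp_def]
    rw [sum_count_filter_pos (PySem.Set.ofList vals) vals
        (PySem.Set.nodup_ofList vals) (fun x hx _ => (PySem.Set.mem_ofList vals x).mpr hx)]
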